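-- pv_equiv track=rewrite | github.com/nilande/aoc2023 | day 12/day 12.py | get_validation_masks
-- ===== SOURCE A (Python) =====
-- def get_validation_masks(broken_record):
--     mask_not_op = 0
--     mask_dmg = 0
--     for spring in broken_record:
--         mask_not_op <<= 1
--         mask_dmg <<= 1
--         match spring:
--             case '#':
--                 mask_not_op |= 1
--                 mask_dmg |= 1
--             case '?':
--                 mask_not_op |= 1
--     return (mask_not_op, mask_dmg)
-- ===== SOURCE B (Python) =====
-- def get_validation_masks(broken_record):
--     if not broken_record:
--         return (0, 0)
--     s_not_op = ''.join('1' if c in '#?' else '0' for c in broken_record)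
--     s_dmg = ''.join('1' if c == '#' else '0' for c in broken_record)
--     return (int(s_not_op, 2), int(s_dmg, 2))
-- ===== Notes on version B (the rewrite author's own statement) =====
-- stated objective: idiomatic
-- what changed: Replaces the single-pass shift/OR accumulation of two ints with building two binary-digit strings by character mapping and parsing each once with int(s, 2), guarding the empty string.
import Mathlib
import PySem

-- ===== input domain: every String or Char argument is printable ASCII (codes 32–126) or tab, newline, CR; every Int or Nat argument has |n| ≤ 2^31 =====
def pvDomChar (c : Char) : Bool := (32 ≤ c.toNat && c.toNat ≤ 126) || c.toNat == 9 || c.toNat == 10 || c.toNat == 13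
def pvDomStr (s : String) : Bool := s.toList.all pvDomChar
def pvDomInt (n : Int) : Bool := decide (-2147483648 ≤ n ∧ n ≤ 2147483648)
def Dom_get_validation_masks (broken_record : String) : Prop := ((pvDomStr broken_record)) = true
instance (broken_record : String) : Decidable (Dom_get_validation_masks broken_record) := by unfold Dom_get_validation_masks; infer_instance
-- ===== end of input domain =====

-- ===== PORT A =====
-- A: one pass, two accumulators. Python 'm <<= 1' on these nonnegative ints is 'm * 2'
-- (exact: left shift by one on Int), and 'm |= 1' right after a shift sets the low bit of
-- an even nonnegative number, exact as 'm + 1'.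
def get_validation_masks (broken_record : String) : Int × Int :=
  broken_record.toList.foldl
    (fun (m : Int × Int) spring =>
      let mask_not_op := m.1 * 2
      let mask_dmg := m.2 * 2
      if spring = '#' then (mask_not_op + 1, mask_dmg + 1)
      else if spring = '?' then (mask_not_op + 1, mask_dmg)
      else (mask_not_op, mask_dmg))
    (0, 0)

-- ===== PORT B =====
-- B: map each char to a binary digit, then parse each digit string with int(s, 2)
-- (exact for strings of '0'/'1': Python's base-2 parse is this left fold over digits).
def pvIntOfBin (s : List Char) : Int :=
  s.foldl (fun a c => a * 2 + (if c = '1' then 1 else 0)) 0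

def get_validation_masks_alt (broken_record : String) : Int × Int :=
  if broken_record = "" then (0, 0)
  else
    let s_not_op := broken_record.toList.map (fun c => if c = '#' ∨ c = '?' then '1' else '0')
    let s_dmg := broken_record.toList.map (fun c => if c = '#' then '1' else '0')
    (pvIntOfBin s_not_op, pvIntOfBin s_dmg)

-- ===== PRECONDITION & SPEC =====
def Spec_get_validation_masks (broken_record : String) (out : Int × Int) : Prop := out = get_validation_masks_alt broken_record
instance (broken_record : String) (out : Int × Int) : Decidable (Spec_get_validation_masks broken_record out) := by unfold Spec_get_validation_masks; infer_instance

-- ===== CLAIM (what is proved, stated in full; the proofs are below) =====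
def Claim_equal_get_validation_masks : Prop := ∀ (broken_record : String), Dom_get_validation_masks broken_record → Spec_get_validation_masks broken_record (get_validation_masks broken_record)

-- ===== LEMMAS AND PROOFS =====

-- ===== VERDICT (by name: the statement is the Claim_ definition above) =====
-- Loop invariant: A's paired fold from any accumulators equals the two independent
-- base-2 parses of the mapped digit strings started from those accumulators.
theorem pv_fold_eq (cs : List Char) (a b : Int) :
    cs.foldl
      (fun (m : Int × Int) spring =>
        let mask_not_op := m.1 * 2
        let mask_dmg := m.2 * 2
        if spring = '#' then (mask_not_op + 1, mask_dmg + 1)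
        else if spring = '?' then (mask_not_op + 1, mask_dmg)
        else (mask_not_op, mask_dmg))
      (a, b)
    = ((cs.map (fun c => if c = '#' ∨ c = '?' then '1' else '0')).foldl
         (fun a c => a * 2 + (if c = '1' then 1 else 0)) a,
       (cs.map (fun c => if c = '#' then '1' else '0')).foldl
         (fun a c => a * 2 + (if c = '1' then 1 else 0)) b) := by
  induction cs generalizing a b with
  | nil => rfl
  | cons c cs ih =>
    simp only [List.foldl_cons, List.map_cons]
    by_cases h1 : c = '#'
    · simp [h1, ih]
    · by_cases h2 : c = '?'
      · simp [h2, ih]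
      · simp [h1, h2, ih]

theorem get_validation_masks_spec : Claim_equal_get_validation_masks := by
  intro s _
  show get_validation_masks s = get_validation_masks_alt s
  unfold get_validation_masks get_validation_masks_alt pvIntOfBin
  by_cases hs : s = ""
  · subst hs; rfl
  · simp only [hs, if_false]
    exact pv_fold_eq s.toList 0 0
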